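-- pv_equiv track=rewrite | github.com/simcak/bc_ppg-to-hr | mypackage/SeP.py | confusion_matrix_calc
-- ===== SOURCE A (Python) =====
-- def confusion_matrix_calc(peaks, ref_peaks, tolerance):
--     FN = 0
--     FP = 0
--     TP = 0
--
--     for peak in peaks:
--         pom = [ref for ref in ref_peaks if abs(peak - ref) <= tolerance]
--         if not pom:
--             FP += 1
--
--     for peak in ref_peaks:
--         pom = [q for q in peaks if abs(peak - q) <= tolerance]
--         if not pom:
--             FN += 1
--         elif pom:
--             TP += 1
--             if len(pom) >= 2:
--                 FP += len(pom) - 1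
--
--     if not ref_peaks:
--         TP = 0
--         FP = 0
--         FN = 0
--
--     return FN, FP, TP
-- ===== SOURCE B (Python) =====
-- def confusion_matrix_calc(peaks, ref_peaks, tolerance):
--     if not ref_peaks:
--         return 0, 0, 0
--
--     sp = sorted(peaks)
--     sr = sorted(ref_peaks)
--
--     def match_counts(xs, ys):
--         # xs, ys ascending; for each x, count of y with |x - y| <= tolerance.
--         # Two monotone pointers kept as stacks (top = smallest remaining).
--         n = len(ys)
--         below = ys[::-1]  # remaining elements >= x - tolerance (top smallest)
--         upto = ys[::-1]   # remaining elements > x + tolerance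
--         counts = []
--         for x in xs:
--             while below and below[-1] < x - tolerance:
--                 below.pop()
--             while upto and upto[-1] <= x + tolerance:
--                 upto.pop()
--             a = n - len(below)  # number of y < x - tolerance
--             b = n - len(upto)   # number of y <= x + tolerance
--             counts.append(b - a if b > a else 0)
--         return counts
--
--     FN = 0
--     FP = 0
--     TP = 0
--     for c in match_counts(sp, sr):
--         if c == 0:
--             FP += 1
--     for c in match_counts(sr, sp):
--         if c == 0:
--             FN += 1
--         else:
--             TP += 1
--             FP += c - 1
--     return FN, FP, TP
-- ===== Notes on version B (the rewrite author's own statement) =====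
-- stated objective: faster
-- what changed: Replaced the per-element rescans of the other list (quadratic) by sorting both lists once and sliding two monotone stack pointers over each sorted list to get every within-tolerance match count in one pass.
import Mathlib
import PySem

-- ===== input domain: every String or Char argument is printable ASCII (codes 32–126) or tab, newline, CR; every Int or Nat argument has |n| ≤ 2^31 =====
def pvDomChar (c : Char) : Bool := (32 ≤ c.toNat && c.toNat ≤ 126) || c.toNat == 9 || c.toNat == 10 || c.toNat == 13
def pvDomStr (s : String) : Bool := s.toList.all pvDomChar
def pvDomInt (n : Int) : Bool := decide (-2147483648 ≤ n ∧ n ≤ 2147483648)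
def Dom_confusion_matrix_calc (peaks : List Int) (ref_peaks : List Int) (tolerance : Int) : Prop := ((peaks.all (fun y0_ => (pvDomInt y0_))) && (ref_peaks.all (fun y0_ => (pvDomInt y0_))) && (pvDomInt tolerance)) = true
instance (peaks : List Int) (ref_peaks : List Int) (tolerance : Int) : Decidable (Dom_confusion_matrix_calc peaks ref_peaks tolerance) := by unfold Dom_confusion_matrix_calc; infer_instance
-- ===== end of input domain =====

-- B replaces A's per-element rescans of the other list by sorting both lists once and
-- sliding monotone stack pointers over them (objective: faster, asymptotic).

-- shared trivial predicate: Python's 'abs(p - r) <= tolerance'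
def pvNear (tol p r : Int) : Bool := decide (|p - r| ≤ tol)

-- ===== PORT A =====
def confusion_matrix_calc (peaks : List Int) (ref_peaks : List Int) (tolerance : Int) : Int × Int × Int :=
  let FN : Int := 0
  let FP : Int := 0
  let TP : Int := 0
  -- first loop: FP += 1 for each peak with empty pom
  let FP := peaks.foldl (fun FP peak =>
      let pom := ref_peaks.filter (fun ref => pvNear tolerance peak ref)
      if pom.isEmpty then FP + 1 else FP) FP
  -- second loop over ref_peaks updating FN, FP, TP
  let s := ref_peaks.foldl (fun (s : Int × Int × Int) peak =>
      let (FN, FP, TP) := s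
      let pom := peaks.filter (fun q => pvNear tolerance peak q)
      if pom.isEmpty then (FN + 1, FP, TP)
      else (FN, (if pom.length ≥ 2 then FP + ((pom.length : Int) - 1) else FP), TP + 1)) (FN, FP, TP)
  if ref_peaks.isEmpty then (0, 0, 0) else s

-- ===== PORT B =====
-- the two 'while … pop()' loops on the stacks (top = smallest remaining) are head-drops here
def pvGo (tol n : Int) (xs below upto : List Int) : List Int :=
  match xs with
  | [] => []
  | x :: rest =>
    let below' := below.dropWhile (fun y => decide (y < x - tol))
    let upto' := upto.dropWhile (fun y => decide (y ≤ x + tol))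
    let a : Int := n - (below'.length : Int)
    let b : Int := n - (upto'.length : Int)
    (if b > a then b - a else 0) :: pvGo tol n rest below' upto'

def pvMatchCounts (tol : Int) (xs ys : List Int) : List Int :=
  pvGo tol (ys.length : Int) xs ys ys

def confusion_matrix_calc_alt (peaks : List Int) (ref_peaks : List Int) (tolerance : Int) : Int × Int × Int :=
  if ref_peaks.isEmpty then (0, 0, 0) else
    let sp := PySem.List.sorted peaks (fun x => x) false
    let sr := PySem.List.sorted ref_peaks (fun x => x) false
    let FP1 : Int := (pvMatchCounts tolerance sp sr).foldl
        (fun FP c => if c = 0 then FP + 1 else FP) 0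
    (pvMatchCounts tolerance sr sp).foldl
        (fun (s : Int × Int × Int) c =>
          let (FN, FP, TP) := s
          if c = 0 then (FN + 1, FP, TP) else (FN, FP + (c - 1), TP + 1)) (0, FP1, 0)

-- ===== PRECONDITION & SPEC =====
def Spec_confusion_matrix_calc (peaks : List Int) (ref_peaks : List Int) (tolerance : Int) (out : Int × Int × Int) : Prop := out = confusion_matrix_calc_alt peaks ref_peaks tolerance
instance (peaks : List Int) (ref_peaks : List Int) (tolerance : Int) (out : Int × Int × Int) : Decidable (Spec_confusion_matrix_calc peaks ref_peaks tolerance out) := by unfold Spec_confusion_matrix_calc; infer_instance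

-- ===== CLAIM (what is proved, stated in full; the proofs are below) =====
def Claim_equal_confusion_matrix_calc : Prop := ∀ (peaks : List Int) (ref_peaks : List Int) (tolerance : Int), Dom_confusion_matrix_calc peaks ref_peaks tolerance → Spec_confusion_matrix_calc peaks ref_peaks tolerance (confusion_matrix_calc peaks ref_peaks tolerance)

-- ===== LEMMAS AND PROOFS =====

-- dropWhile on a sorted list is a filter
theorem pv_dropWhile_lt (a : Int) : ∀ (ys : List Int), ys.Pairwise (· ≤ ·) →
    ys.dropWhile (fun y => decide (y < a)) = ys.filter (fun y => decide (a ≤ y)) := by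
  intro ys h
  induction ys with
  | nil => simp
  | cons y t ih =>
    rcases List.pairwise_cons.mp h with ⟨hy, ht⟩
    by_cases hya : y < a
    · simp [hya, not_le.mpr hya, ih ht]
    · simp only [List.dropWhile_cons, List.filter_cons, decide_eq_true_eq]
      rw [if_neg (by simpa using hya), if_pos (by simpa using not_lt.mp hya)]
      rw [List.filter_eq_self.mpr]
      intro z hz
      simpa using le_trans (not_lt.mp hya) (hy z hz)

theorem pv_dropWhile_le (a : Int) : ∀ (ys : List Int), ys.Pairwise (· ≤ ·) →
    ys.dropWhile (fun y => decide (y ≤ a)) = ys.filter (fun y => decide (a < y)) := by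
  intro ys h
  induction ys with
  | nil => simp
  | cons y t ih =>
    rcases List.pairwise_cons.mp h with ⟨hy, ht⟩
    by_cases hya : y ≤ a
    · simp [hya, not_lt.mpr hya, ih ht]
    · simp only [List.dropWhile_cons, List.filter_cons, decide_eq_true_eq]
      rw [if_neg (by simpa using hya), if_pos (by simpa using not_le.mp hya)]
      rw [List.filter_eq_self.mpr]
      intro z hz
      simpa using lt_of_lt_of_le (not_le.mp hya) (hy z hz)

theorem pv_filter_le_le (b a : Int) (hba : b ≤ a) (ys : List Int) :
    (ys.filter (fun y => decide (b ≤ y))).filter (fun y => decide (a ≤ y))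
      = ys.filter (fun y => decide (a ≤ y)) := by
  induction ys with
  | nil => rfl
  | cons y t ih =>
    by_cases h1 : a ≤ y
    · have h2 : b ≤ y := le_trans hba h1
      simp [h1, h2, ih]
    · by_cases h2 : b ≤ y <;> simp [h1, h2, ih]

theorem pv_filter_lt_lt (b a : Int) (hba : b ≤ a) (ys : List Int) :
    (ys.filter (fun y => decide (b < y))).filter (fun y => decide (a < y))
      = ys.filter (fun y => decide (a < y)) := by
  induction ys with
  | nil => rfl
  | cons y t ih =>
    by_cases h1 : a < y
    · have h2 : b < y := lt_of_le_of_lt hba h1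
      simp [h1, h2, ih]
    · by_cases h2 : b < y <;> simp [h1, h2, ih]

theorem pv_countP_split_le (a : Int) (ys : List Int) :
    ys.countP (fun y => decide (a ≤ y)) + ys.countP (fun y => decide (y < a)) = ys.length := by
  induction ys with
  | nil => rfl
  | cons y t ih =>
    simp only [List.countP_cons, List.length_cons]
    split_ifs <;> simp_all only [decide_eq_true_eq] <;> omega

theorem pv_countP_split_lt (a : Int) (ys : List Int) :
    ys.countP (fun y => decide (a < y)) + ys.countP (fun y => decide (y ≤ a)) = ys.length := by
  induction ys with
  | nil => rfl
  | cons y t ih =>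
    simp only [List.countP_cons, List.length_cons]
    split_ifs <;> simp_all only [decide_eq_true_eq] <;> omega

theorem pvNear_eq (tol x y : Int) : pvNear tol x y = decide (x - tol ≤ y ∧ y ≤ x + tol) := by
  unfold pvNear
  apply decide_eq_decide.mpr
  rw [abs_le]
  omega

theorem pv_cw_pos (x tol : Int) (h : 0 ≤ tol) (ys : List Int) :
    ys.countP (fun y => decide (y ≤ x + tol))
      = ys.countP (fun y => decide (y < x - tol)) + ys.countP (fun y => pvNear tol x y) := by
  induction ys with
  | nil => rfl
  | cons y t ih =>
    simp only [pvNear_eq] at ih ⊢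
    simp only [List.countP_cons, ih]
    simp only [decide_eq_true_eq]
    split_ifs <;> omega

theorem pv_cw_neg_zero (x tol : Int) (h : tol < 0) (ys : List Int) :
    ys.countP (fun y => pvNear tol x y) = 0 := by
  rw [List.countP_eq_zero]
  intro y _
  simp only [pvNear, decide_eq_true_eq]
  intro hc
  exact absurd (le_trans (abs_nonneg _) hc) (not_le.mpr h)

theorem pv_cw_neg_le (x tol : Int) (h : tol < 0) (ys : List Int) :
    ys.countP (fun y => decide (y ≤ x + tol)) ≤ ys.countP (fun y => decide (y < x - tol)) := by
  apply List.countP_mono_left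
  intro y _ hy
  simp only [decide_eq_true_eq] at *
  omega

theorem pv_count_window (x tol : Int) (ys : List Int) :
    (if ((ys.countP (fun y => decide (y ≤ x + tol)) : Int)) > ((ys.countP (fun y => decide (y < x - tol)) : Int))
      then ((ys.countP (fun y => decide (y ≤ x + tol)) : Int)) - ((ys.countP (fun y => decide (y < x - tol)) : Int))
      else 0)
    = (ys.countP (fun y => pvNear tol x y) : Int) := by
  by_cases h : 0 ≤ tol
  · have := pv_cw_pos x tol h ys
    split_ifs with hgt <;> omega
  · have h' : tol < 0 := by omega
    have h0 := pv_cw_neg_zero x tol h' ys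
    have hle := pv_cw_neg_le x tol h' ys
    split_ifs with hgt <;> omega

-- the two-pointer loop computes, for each x, the count of ys within tolerance
theorem pv_go_spec (tol : Int) (ys : List Int) (hys : ys.Pairwise (· ≤ ·)) :
    ∀ (xs : List Int), xs.Pairwise (· ≤ ·) →
    ∀ (b1 b2 : Int), (∀ x ∈ xs, b1 ≤ x - tol ∧ b2 ≤ x + tol) →
    pvGo tol (ys.length : Int) xs (ys.filter (fun y => decide (b1 ≤ y))) (ys.filter (fun y => decide (b2 < y)))
      = xs.map (fun x => (ys.countP (fun y => pvNear tol x y) : Int)) := by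
  intro xs
  induction xs with
  | nil => intro _ b1 b2 _; rfl
  | cons x rest ih =>
    intro hxs b1 b2 hb
    rcases List.pairwise_cons.mp hxs with ⟨hx, hrest⟩
    obtain ⟨hb1, hb2⟩ := hb x (List.mem_cons_self)
    have hbelow : (ys.filter (fun y => decide (b1 ≤ y))).dropWhile (fun y => decide (y < x - tol))
        = ys.filter (fun y => decide (x - tol ≤ y)) := by
      rw [pv_dropWhile_lt (x - tol) _ (List.Pairwise.filter _ hys)]
      exact pv_filter_le_le b1 (x - tol) hb1 ys
    have hupto : (ys.filter (fun y => decide (b2 < y))).dropWhile (fun y => decide (y ≤ x + tol))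
        = ys.filter (fun y => decide (x + tol < y)) := by
      rw [pv_dropWhile_le (x + tol) _ (List.Pairwise.filter _ hys)]
      exact pv_filter_lt_lt b2 (x + tol) hb2 ys
    show pvGo _ _ _ _ _ = _
    rw [pvGo]
    simp only [hbelow, hupto, List.map_cons]
    congr 1
    · have e1 : ((ys.filter (fun y => decide (x - tol ≤ y))).length : Int)
          = (ys.countP (fun y => decide (x - tol ≤ y)) : Int) := by
        rw [← List.countP_eq_length_filter]
      have e2 : ((ys.filter (fun y => decide (x + tol < y))).length : Int)
          = (ys.countP (fun y => decide (x + tol < y)) : Int) := by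
        rw [← List.countP_eq_length_filter]
      have s1 := pv_countP_split_le (x - tol) ys
      have s2 := pv_countP_split_lt (x + tol) ys
      have := pv_count_window x tol ys
      rw [e1, e2]
      split_ifs at * <;> omega
    · have := ih hrest (x - tol) (x + tol) (fun x' hx' => ⟨by have := hx x' hx'; omega, by have := hx x' hx'; omega⟩)
      exact this

theorem pv_matchCounts_spec (tol : Int) (xs ys : List Int)
    (hys : ys.Pairwise (· ≤ ·)) (hxs : xs.Pairwise (· ≤ ·))
    (hbx : ∀ x ∈ xs, -2147483648 ≤ x ∧ x ≤ 2147483648)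
    (hby : ∀ y ∈ ys, -2147483648 ≤ y ∧ y ≤ 2147483648)
    (htol : -2147483648 ≤ tol ∧ tol ≤ 2147483648) :
    pvMatchCounts tol xs ys = xs.map (fun x => (ys.countP (fun y => pvNear tol x y) : Int)) := by
  have e1 : ys.filter (fun y => decide ((-8589934592 : Int) ≤ y)) = ys := by
    rw [List.filter_eq_self]
    intro y hy
    have := hby y hy
    simp only [decide_eq_true_eq]
    omega
  have e2 : ys.filter (fun y => decide ((-8589934592 : Int) < y)) = ys := by
    rw [List.filter_eq_self]
    intro y hy
    have := hby y hy
    simp only [decide_eq_true_eq]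
    omega
  have := pv_go_spec tol ys hys xs hxs (-8589934592) (-8589934592)
    (fun x hx => by have := hbx x hx; constructor <;> omega)
  rw [e1, e2] at this
  exact this

-- generic shape of both second loops, over a list of (already computed) counts
theorem pv_foldB (cs : List Int) : ∀ (FN FP TP : Int),
    cs.foldl (fun (s : Int × Int × Int) c =>
        let (FN, FP, TP) := s
        if c = 0 then (FN + 1, FP, TP) else (FN, FP + (c - 1), TP + 1)) (FN, FP, TP)
      = (FN + (cs.countP (fun c => decide (c = 0)) : Int),
         FP + (cs.map (fun c => if c = 0 then (0 : Int) else c - 1)).sum,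
         TP + (cs.countP (fun c => decide (¬ c = 0)) : Int)) := by
  induction cs with
  | nil => intro FN FP TP; simp
  | cons c t ih =>
    intro FN FP TP
    simp only [List.foldl_cons, List.countP_cons, List.map_cons, List.sum_cons]
    by_cases h : c = 0
    · rw [if_pos h, ih]
      simp [h] <;> omega
    · rw [if_neg h, ih]
      simp [h] <;> omega

-- A's second loop equals the generic fold over the mapped counts
theorem pv_stepA_eq (peaks : List Int) (tol : Int) (refs : List Int) (init : Int × Int × Int) :
    refs.foldl (fun (s : Int × Int × Int) peak =>
      let (FN, FP, TP) := s
      let pom := peaks.filter (fun q => pvNear tol peak q)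
      if pom.isEmpty then (FN + 1, FP, TP)
      else (FN, (if pom.length ≥ 2 then FP + ((pom.length : Int) - 1) else FP), TP + 1)) init
    = (refs.map (fun p => (peaks.countP (fun q => pvNear tol p q) : Int))).foldl
        (fun (s : Int × Int × Int) c =>
          let (FN, FP, TP) := s
          if c = 0 then (FN + 1, FP, TP) else (FN, FP + (c - 1), TP + 1)) init := by
  rw [List.foldl_map]
  apply List.foldl_ext
  intro s p _
  obtain ⟨FN, FP, TP⟩ := s
  dsimp only
  have hlen : (peaks.filter (fun q => pvNear tol p q)).length = peaks.countP (fun q => pvNear tol p q) :=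
    (List.countP_eq_length_filter ..).symm
  by_cases hemp : (peaks.filter (fun q => pvNear tol p q)).isEmpty
  · have h0 : ((peaks.countP (fun q => pvNear tol p q) : Int)) = 0 := by
      rw [← hlen]
      rw [List.isEmpty_iff] at hemp
      simp [hemp]
    rw [if_pos hemp, if_pos h0]
  · have h0 : ¬ ((peaks.countP (fun q => pvNear tol p q) : Int)) = 0 := by
      rw [← hlen]
      rw [List.isEmpty_iff, ← List.length_eq_zero_iff] at hemp
      simpa using hemp
    rw [if_neg hemp, if_neg h0]
    by_cases h2 : (peaks.filter (fun q => pvNear tol p q)).length ≥ 2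
    · rw [if_pos h2, hlen]
    · have hne : (peaks.filter (fun q => pvNear tol p q)).length ≠ 0 := by
        rw [List.isEmpty_iff, ← List.length_eq_zero_iff] at hemp
        exact hemp
      have h1 : (peaks.filter (fun q => pvNear tol p q)).length = 1 := by omega
      rw [if_neg h2]
      rw [hlen] at h1
      simp [h1]

-- ===== VERDICT (by name: the statement is the Claim_ definition above) =====
theorem confusion_matrix_calc_spec : Claim_equal_confusion_matrix_calc := by
  intro peaks refs tol hdom
  unfold Spec_confusion_matrix_calc
  unfold Dom_confusion_matrix_calc at hdom
  simp only [Bool.and_eq_true, List.all_eq_true, pvDomInt, decide_eq_true_eq] at hdom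
  obtain ⟨⟨hpB, hrB⟩, htolB⟩ := hdom
  by_cases hre : refs.isEmpty
  · simp [confusion_matrix_calc, confusion_matrix_calc_alt, hre]
  · have hrne : refs ≠ [] := by simpa [List.isEmpty_iff] using hre
    -- sorted copies
    have hspP : (PySem.List.sorted peaks (fun x => x) false).Perm peaks := PySem.List.sorted_perm ..
    have hsrP : (PySem.List.sorted refs (fun x => x) false).Perm refs := PySem.List.sorted_perm ..
    have hspS : (PySem.List.sorted peaks (fun x => x) false).Pairwise (· ≤ ·) := by
      simpa using PySem.List.sorted_pairwise peaks (fun x => x)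
    have hsrS : (PySem.List.sorted refs (fun x => x) false).Pairwise (· ≤ ·) := by
      simpa using PySem.List.sorted_pairwise refs (fun x => x)
    have hspB : ∀ x ∈ PySem.List.sorted peaks (fun x => x) false, -2147483648 ≤ x ∧ x ≤ 2147483648 := by
      intro x hx
      exact hpB x ((PySem.List.mem_sorted ..).mp hx)
    have hsrB : ∀ x ∈ PySem.List.sorted refs (fun x => x) false, -2147483648 ≤ x ∧ x ≤ 2147483648 := by
      intro x hx
      exact hrB x ((PySem.List.mem_sorted ..).mp hx)
    -- B's match-count lists, in closed form
    have hmc1 : pvMatchCounts tol (PySem.List.sorted peaks (fun x => x) false) (PySem.List.sorted refs (fun x => x) false)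
        = (PySem.List.sorted peaks (fun x => x) false).map
            (fun x => (refs.countP (fun y => pvNear tol x y) : Int)) := by
      rw [pv_matchCounts_spec tol _ _ hsrS hspS hspB hsrB ⟨htolB.1, htolB.2⟩]
      apply List.map_congr_left
      intro x _
      rw [hsrP.countP_eq]
    have hmc2 : pvMatchCounts tol (PySem.List.sorted refs (fun x => x) false) (PySem.List.sorted peaks (fun x => x) false)
        = (PySem.List.sorted refs (fun x => x) false).map
            (fun x => (peaks.countP (fun y => pvNear tol x y) : Int)) := by
      rw [pv_matchCounts_spec tol _ _ hspS hsrS hsrB hspB ⟨htolB.1, htolB.2⟩]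
      apply List.map_congr_left
      intro x _
      rw [hspP.countP_eq]
    -- A's first loop
    have hA1 : peaks.foldl (fun FP peak =>
        let pom := refs.filter (fun ref => pvNear tol peak ref)
        if pom.isEmpty then FP + 1 else FP) (0 : Int)
        = (peaks.countP (fun peak => (refs.filter (fun ref => pvNear tol peak ref)).isEmpty) : Int) := by
      have := PySem.List.foldl_if_add_one
        (fun peak => (refs.filter (fun ref => pvNear tol peak ref)).isEmpty) peaks (0 : Int)
      simpa using this
    -- B's first loop
    have hB1 : ((PySem.List.sorted peaks (fun x => x) false).map
          (fun x => (refs.countP (fun y => pvNear tol x y) : Int))).foldl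
          (fun FP c => if c = 0 then FP + 1 else FP) (0 : Int)
        = (peaks.countP (fun peak => (refs.filter (fun ref => pvNear tol peak ref)).isEmpty) : Int) := by
      have := PySem.List.foldl_ite_add_one (fun c : Int => c = 0)
        ((PySem.List.sorted peaks (fun x => x) false).map
          (fun x => (refs.countP (fun y => pvNear tol x y) : Int))) (0 : Int)
      rw [this]
      rw [List.countP_map]
      rw [hspP.countP_eq]
      rw [zero_add]
      congr 1
      apply List.countP_congr
      intro p _
      simp only [Function.comp, decide_eq_true_eq]
      rw [List.isEmpty_iff, ← List.length_eq_zero_iff, ← List.countP_eq_length_filter]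
      constructor
      · intro h'
        exact_mod_cast h'
      · intro h'
        exact_mod_cast h'
    -- main computation
    simp only [confusion_matrix_calc, confusion_matrix_calc_alt]
    rw [if_neg hre, if_neg hre]
    rw [hmc1, hmc2, hA1, hB1]
    rw [pv_stepA_eq, pv_foldB, pv_foldB]
    have hperm : ((PySem.List.sorted refs (fun x => x) false).map
          (fun x => (peaks.countP (fun y => pvNear tol x y) : Int))).Perm
        (refs.map (fun p => (peaks.countP (fun q => pvNear tol p q) : Int))) := hsrP.map _
    rw [hperm.countP_eq, hperm.countP_eq, (hperm.map _).sum_eq]
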